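-- pv_equiv track=rewrite | github.com/coffee-and-problems/camera-study | CityLight/lib/asciidatalocal/asciiutils.py | separate_white
-- ===== SOURCE A (Python) =====
-- def separate_white(line):
--     """
--     Separates a line along the whitespace
--
--     The method transforms a line into the list
--     of its space-separated items. The first space
--     is the delimiter, any further spaces are interpreted
--     to belong to the item and are preserved.
--     This is advantageous to keep the item length for
--     string columns with leading spaces.
--
--     @param line: the ascii line to be separated
--     @type line: string
--
--     @return: the list of items
--     @rtype: [string]
--     """
--     # create the item list
--     witems = []
--
--     # split it conventionally
--     items = line.strip().split()
--
--     # go again over the line and identify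
--     # the exact starting position of each
--     # item, preserving the leading spaces
--     start=0
--     for item in items:
--         pos = line.find(item,start)
--         if pos > -1:
--             witems.append(line[start:pos+len(item)])
--             start = pos+len(item)+1
--
--     # return the list
--     return witems
-- ===== SOURCE B (Python) =====
-- def separate_white(line):
--     """Single manual pass over the characters: pending whitespace is
--     accumulated and glued onto the front of the next word; exactly one
--     delimiter char is skipped after each word."""
--     witems = []
--     acc = []          # whitespace seen since the end of the previous item
--     i = 0
--     n = len(line)
--     while i < n:
--         c = line[i]
--         if c.isspace():
--             acc.append(c)
--             i += 1
--         else: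
--             j = i
--             while j < n and not line[j].isspace():
--                 j += 1
--             witems.append(''.join(acc) + line[i:j])
--             acc = []
--             i = j + 1
--     return witems
-- ===== Notes on version B (the rewrite author's own statement) =====
-- stated objective: alternative
-- what changed: Replaces A's strip()+split()+per-item find() re-scan of the line by one manual character pass that accumulates pending whitespace and glues it onto the next non-space run, skipping exactly one delimiter after each item.
import Mathlib
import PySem

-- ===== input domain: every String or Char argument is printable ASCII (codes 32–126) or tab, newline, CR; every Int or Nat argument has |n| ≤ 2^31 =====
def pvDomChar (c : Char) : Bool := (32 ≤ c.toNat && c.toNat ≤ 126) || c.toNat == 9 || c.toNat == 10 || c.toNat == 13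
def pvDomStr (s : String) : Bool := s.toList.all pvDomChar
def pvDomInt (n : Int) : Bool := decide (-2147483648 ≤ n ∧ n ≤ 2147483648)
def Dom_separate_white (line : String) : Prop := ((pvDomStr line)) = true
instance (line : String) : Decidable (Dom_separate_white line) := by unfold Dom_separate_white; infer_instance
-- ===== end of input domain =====

-- B replaces strip+split+find by a single manual character scan; equivalence is exact (A is total).
-- ===== PORT A =====
-- the loop body of A: pos = line.find(item, start); if pos > -1: append line[start:pos+len(item)]; start = pos+len(item)+1
def sepWhiteStep (cs : List Char) (st : List (List Char) × Int) (item : List Char) :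
    List (List Char) × Int :=
  let pos := PySem.Chars.findFrom cs item st.2
  if pos > -1 then
    (st.1 ++ [PySem.List.slice cs (some st.2) (some (pos + (item.length : Int)))],
     pos + (item.length : Int) + 1)
  else st

def separate_white (line : String) : List String :=
  (((PySem.Chars.split₀ (PySem.Chars.strip line.toList)).foldl
      (sepWhiteStep line.toList) ([], 0)).1).map (fun l => String.ofList l)

-- ===== PORT B =====
-- B's scan: pending whitespace in acc; a non-space run is the next item (acc glued on), one delimiter skipped
def sepWhiteGo (acc : List Char) (cs : List Char) : List (List Char) :=
  match cs with
  | [] => []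
  | c :: rest =>
    if PySem.Chars.isspace c then sepWhiteGo (acc ++ [c]) rest
    else (acc ++ c :: rest.takeWhile (fun x => !PySem.Chars.isspace x)) ::
         sepWhiteGo [] ((rest.dropWhile (fun x => !PySem.Chars.isspace x)).tail)
termination_by cs.length
decreasing_by
  · simp
  · have h := List.length_dropWhile_le (fun x => !PySem.Chars.isspace x) rest
    simp only [List.length_cons, List.length_tail]
    omega

def separate_white_alt (line : String) : List String :=
  (sepWhiteGo [] line.toList).map (fun l => String.ofList l)

-- ===== PRECONDITION & SPEC =====
def Spec_separate_white (line : String) (out : List String) : Prop := out = separate_white_alt line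
instance (line : String) (out : List String) : Decidable (Spec_separate_white line out) := by unfold Spec_separate_white; infer_instance

-- ===== CLAIM (what is proved, stated in full; the proofs are below) =====
def Claim_equal_separate_white : Prop := ∀ (line : String), Dom_separate_white line → Spec_separate_white line (separate_white line)

-- ===== LEMMAS AND PROOFS =====

-- the words of a line: maximal non-space runs, in order (proof-side characterisation of split())
def pvWords (cs : List Char) : List (List Char) :=
  match cs with
  | [] => []
  | c :: rest =>
    if PySem.Chars.isspace c then pvWords rest
    else (c :: rest.takeWhile (fun x => !PySem.Chars.isspace x)) ::
         pvWords (rest.dropWhile (fun x => !PySem.Chars.isspace x))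
termination_by cs.length
decreasing_by
  · simp
  · have h := List.length_dropWhile_le (fun x => !PySem.Chars.isspace x) rest
    simp only [List.length_cons]
    omega

lemma pvWords_nil : pvWords [] = [] := by simp [pvWords]

lemma pvWords_cons_space {c : Char} (rest : List Char) (hc : PySem.Chars.isspace c = true) :
    pvWords (c :: rest) = pvWords rest := by
  rw [pvWords]; simp [hc]

lemma pvWords_cons_nonspace {c : Char} (rest : List Char) (hc : PySem.Chars.isspace c = false) :
    pvWords (c :: rest) =
      (c :: rest.takeWhile (fun x => !PySem.Chars.isspace x)) ::
        pvWords (rest.dropWhile (fun x => !PySem.Chars.isspace x)) := by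
  rw [pvWords]; simp [hc]

lemma pvWords_space_prefix (sp t : List Char) (h : ∀ c ∈ sp, PySem.Chars.isspace c = true) :
    pvWords (sp ++ t) = pvWords t := by
  induction sp with
  | nil => simp
  | cons c rest ih =>
    have hc := h c (by simp)
    rw [List.cons_append, pvWords_cons_space _ hc, ih (fun x hx => h x (by simp [hx]))]

lemma pvWords_space_suffix (n : Nat) : ∀ (t sp : List Char), t.length ≤ n →
    (∀ c ∈ sp, PySem.Chars.isspace c = true) → pvWords (t ++ sp) = pvWords t := by
  induction n with
  | zero =>
    intro t sp hlen hsp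
    have ht : t = [] := by cases t <;> simp_all
    subst ht
    simpa using pvWords_space_prefix sp [] hsp
  | succ n ih =>
    intro t sp hlen hsp
    cases t with
    | nil => simpa using pvWords_space_prefix sp [] hsp
    | cons c rest =>
      by_cases hc : PySem.Chars.isspace c = true
      · rw [List.cons_append, pvWords_cons_space _ hc, pvWords_cons_space _ hc]
        exact ih rest sp (by simpa using Nat.lt_succ_iff.mp (by simpa using hlen)) hsp
      · have hc' : PySem.Chars.isspace c = false := by simpa using hc
        rw [List.cons_append, pvWords_cons_nonspace _ hc', pvWords_cons_nonspace _ hc']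
        by_cases hall : (rest.takeWhile (fun x => !PySem.Chars.isspace x)).length = rest.length
        · -- rest is all non-space
          have hrest : rest.takeWhile (fun x => !PySem.Chars.isspace x) = rest :=
            (List.takeWhile_prefix _).eq_of_length hall
          have hdw : rest.dropWhile (fun x => !PySem.Chars.isspace x) = [] := by
            have h0 := List.takeWhile_append_dropWhile
              (p := fun x => !PySem.Chars.isspace x) (l := rest)
            rw [hrest] at h0
            simpa using h0
          have hsp_take : sp.takeWhile (fun x => !PySem.Chars.isspace x) = [] := by
            cases sp with
            | nil => rfl
            | cons a as => simp [hsp a (by simp)]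
          have hsp_drop : sp.dropWhile (fun x => !PySem.Chars.isspace x) = sp := by
            cases sp with
            | nil => rfl
            | cons a as => simp [hsp a (by simp)]
          rw [List.takeWhile_append, if_pos hall, List.dropWhile_append, hdw]
          simp only [List.isEmpty_nil, hrest, hsp_take, hsp_drop, List.append_nil]
          have hz : pvWords sp = pvWords ([] : List Char) := by
            simpa using pvWords_space_prefix sp [] hsp
          simp only [if_true, hz, pvWords_nil]
        · -- rest contains a space
          rw [List.takeWhile_append, if_neg hall, List.dropWhile_append]
          have hne : (rest.dropWhile (fun x => !PySem.Chars.isspace x)).isEmpty = false := by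
            by_contra h
            have h2 : rest.dropWhile (fun x => !PySem.Chars.isspace x) = [] := by
              cases hdw : rest.dropWhile (fun x => !PySem.Chars.isspace x) <;> simp_all
            have := List.takeWhile_append_dropWhile
              (p := fun x => !PySem.Chars.isspace x) (l := rest)
            rw [h2, List.append_nil] at this
            exact hall (by rw [this])
          rw [hne]
          simp only [Bool.false_eq_true, if_false]
          congr 1
          exact ih _ sp (by
            have h1 := List.length_dropWhile_le (fun x => !PySem.Chars.isspace x) rest
            have h2 : (c :: rest).length ≤ n + 1 := hlen
            simp at h2
            omega) hsp


lemma split0_go_eq : ∀ (s : List Char) (cur : List Char) (acc : List (List Char)),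
    PySem.Chars.split₀.go s cur acc =
      acc.reverse ++ (if cur = [] then pvWords s
        else (cur.reverse ++ s.takeWhile (fun x => !PySem.Chars.isspace x)) ::
             pvWords (s.dropWhile (fun x => !PySem.Chars.isspace x))) := by
  intro s
  induction s with
  | nil =>
    intro cur acc
    cases cur with
    | nil => simp [PySem.Chars.split₀.go, pvWords]
    | cons a as => simp [PySem.Chars.split₀.go, pvWords]
  | cons c rest ih =>
    intro cur acc
    by_cases hc : PySem.Chars.isspace c = true
    · rw [PySem.Chars.split₀.go]
      cases cur with
      | nil =>
        simp only [hc, if_true, List.isEmpty_nil]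
        rw [ih [] acc]
        simp [pvWords, hc]
      | cons a as =>
        simp only [hc, if_true, List.isEmpty_cons, Bool.false_eq_true, if_false]
        rw [ih [] ((a :: as).reverse :: acc)]
        simp [pvWords, hc]
    · have hc' : PySem.Chars.isspace c = false := by simpa using hc
      rw [PySem.Chars.split₀.go]
      simp only [hc', Bool.false_eq_true, if_false]
      rw [ih (c :: cur) acc]
      cases cur with
      | nil =>
        simp only [List.reverse_nil, List.nil_append, List.reverse_cons]
        rw [show pvWords (c :: rest) = (c :: rest.takeWhile (fun x => !PySem.Chars.isspace x)) :: pvWords (rest.dropWhile (fun x => !PySem.Chars.isspace x)) by rw [pvWords]; simp [hc']]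
        simp
      | cons a as => simp [List.takeWhile_cons, hc']

lemma split0_eq_pvWords (cs : List Char) : PySem.Chars.split₀ cs = pvWords cs := by
  rw [PySem.Chars.split₀, split0_go_eq]
  simp

lemma find_first_word (sp w r : List Char) (c : Char) (t : List Char)
    (hw : w = c :: t) (hc : PySem.Chars.isspace c = false)
    (hsp : ∀ x ∈ sp, PySem.Chars.isspace x = true) :
    PySem.Chars.find (sp ++ w ++ r) w = (sp.length : Int) := by
  have hocc : w <+: List.drop sp.length (sp ++ w ++ r) := by
    rw [List.append_assoc, List.drop_left]
    exact List.prefix_append w r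
  have hpos : 0 ≤ PySem.Chars.find (sp ++ w ++ r) w := by
    rw [PySem.Chars.find_nonneg_iff]
    exact ⟨sp, r, by simp⟩
  obtain ⟨hpre, hmin⟩ := PySem.Chars.find_spec hpos
  have hle : (PySem.Chars.find (sp ++ w ++ r) w).toNat ≤ sp.length := by
    by_contra hgt
    exact hmin sp.length (by omega) hocc
  have hge : ¬ (PySem.Chars.find (sp ++ w ++ r) w).toNat < sp.length := by
    intro hlt
    -- at such a position the string starts with a space, but w starts with non-space
    set i := (PySem.Chars.find (sp ++ w ++ r) w).toNat with hi
    have hdrop : List.drop i (sp ++ w ++ r) = List.drop i sp ++ (w ++ r) := by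
      rw [List.append_assoc, List.drop_append_of_le_length (by omega)]
    obtain ⟨c', u, hcu⟩ : ∃ c' u, List.drop i sp = c' :: u := by
      cases h : List.drop i sp with
      | nil => exfalso; have := List.length_drop (l := sp) (i := i); rw [h] at this; simp at this; omega
      | cons a b => exact ⟨a, b, rfl⟩
    have hc'mem : c' ∈ sp := by
      have : c' ∈ List.drop i sp := by rw [hcu]; simp
      exact List.mem_of_mem_drop this
    have hsp_c' := hsp c' hc'mem
    rw [hdrop, hcu, hw] at hpre
    obtain ⟨tail, htail⟩ := hpre
    have : c = c' := by
      have := htail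
      simp [List.cons_append] at this
      exact this.1
    rw [this, hsp_c'] at hc
    exact absurd hc (by simp)
  have : (PySem.Chars.find (sp ++ w ++ r) w).toNat = sp.length := by omega
  omega

lemma pvWords_strip (cs : List Char) :
    pvWords (PySem.Chars.strip cs) = pvWords cs := by
  rw [PySem.Chars.strip, PySem.Chars.lstrip, PySem.Chars.rstrip]
  set t := List.dropWhile PySem.Chars.isspace cs with ht
  -- right side: cs = spaces ++ t
  have h1 : pvWords cs = pvWords t := by
    conv_rhs => rw [ht]
    conv_lhs => rw [show cs = List.takeWhile PySem.Chars.isspace cs ++ List.dropWhile PySem.Chars.isspace cs from (List.takeWhile_append_dropWhile).symm]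
    exact pvWords_space_prefix _ _ (fun c hc => List.mem_takeWhile_imp hc)
  rw [h1]
  -- left side: t = rstrip t ++ trailing spaces
  have h2 : t = (List.dropWhile PySem.Chars.isspace t.reverse).reverse ++
      (List.takeWhile PySem.Chars.isspace t.reverse).reverse := by
    rw [← List.reverse_append, List.takeWhile_append_dropWhile, List.reverse_reverse]
  conv_rhs => rw [h2]
  rw [pvWords_space_suffix t.length _ _ (by
      have := List.length_dropWhile_le PySem.Chars.isspace t.reverse
      simp only [List.length_reverse] at this ⊢
      exact this)
    (fun c hc => List.mem_takeWhile_imp (List.mem_reverse.mp hc))]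

lemma findFrom_word (cs : List Char) (k : Nat) (sp w r : List Char) (c : Char) (t : List Char)
    (hd : List.drop k cs = sp ++ w ++ r) (hk : k ≤ cs.length)
    (hw : w = c :: t) (hc : PySem.Chars.isspace c = false)
    (hsp : ∀ x ∈ sp, PySem.Chars.isspace x = true) :
    PySem.Chars.findFrom cs w (k : Int) = (k : Int) + (sp.length : Int) := by
  rw [PySem.Chars.findFrom_natCast cs w k hk, hd, find_first_word sp w r c t hw hc hsp]
  rw [if_neg (by omega)]

lemma slice_word (cs : List Char) (k : Nat) (sp w r : List Char)
    (hd : List.drop k cs = sp ++ w ++ r) (hk : k ≤ cs.length) :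
    PySem.List.slice cs (some (k : Int)) (some ((k : Int) + (sp.length : Int) + (w.length : Int)))
      = sp ++ w := by
  have hlen : cs.length - k = sp.length + w.length + r.length := by
    have h := congrArg List.length hd
    simp only [List.length_drop, List.length_append] at h
    omega
  have hb : k + sp.length + w.length ≤ cs.length := by omega
  rw [PySem.List.slice]
  simp only [PySem.List.clampIdx]
  rw [if_neg (by omega), if_neg (by omega)]
  have e1 : min (Int.toNat (k : Int)) cs.length = k := by omega
  have e2 : min ((k : Int) + (sp.length : Int) + (w.length : Int)).toNat cs.length
      = k + sp.length + w.length := by omega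
  rw [e1, e2]
  have e3 : k + sp.length + w.length - k = sp.length + w.length := by omega
  rw [e3, hd]
  exact List.take_left' (by simp)

lemma sepWhiteGo_space_prefix (sp : List Char) : ∀ (acc rest : List Char),
    (∀ c ∈ sp, PySem.Chars.isspace c = true) →
    sepWhiteGo acc (sp ++ rest) = sepWhiteGo (acc ++ sp) rest := by
  induction sp with
  | nil => simp
  | cons c tl ih =>
    intro acc rest h
    rw [List.cons_append, sepWhiteGo]
    simp only [h c (by simp), if_true]
    rw [ih _ rest (fun x hx => h x (by simp [hx]))]
    simp

lemma fold_eq (n : Nat) : ∀ (cs : List Char) (k : Nat) (ws : List (List Char)),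
    cs.length - k ≤ n → k ≤ cs.length →
    ((pvWords (List.drop k cs)).foldl (sepWhiteStep cs) (ws, (k : Int))).1
      = ws ++ sepWhiteGo [] (List.drop k cs) := by
  induction n with
  | zero =>
    intro cs k ws hn hk
    have hd : List.drop k cs = [] := by
      have : (List.drop k cs).length = 0 := by simp [List.length_drop]; omega
      exact List.eq_nil_of_length_eq_zero this
    rw [hd, pvWords_nil, List.foldl_nil, sepWhiteGo, List.append_nil]
  | succ n ih =>
    intro cs k ws hn hk
    set d := List.drop k cs with hdd
    have hd : d = List.takeWhile PySem.Chars.isspace d ++ List.dropWhile PySem.Chars.isspace d :=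
      (List.takeWhile_append_dropWhile).symm
    set sp := List.takeWhile PySem.Chars.isspace d with hspd
    have hsp : ∀ x ∈ sp, PySem.Chars.isspace x = true := fun x hx => List.mem_takeWhile_imp hx
    cases ht : List.dropWhile PySem.Chars.isspace d with
    | nil =>
      -- the rest of the line is all whitespace
      have hall : ∀ x ∈ d, PySem.Chars.isspace x = true := by
        intro x hx
        rw [hd, ht, List.append_nil] at hx
        exact hsp x hx
      rw [show d = sp ++ ([] : List Char) by rw [hd, ht]]
      rw [pvWords_space_prefix sp [] hsp, pvWords_nil, List.foldl_nil]
      rw [sepWhiteGo_space_prefix sp [] [] hsp, sepWhiteGo, List.append_nil]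
    | cons c u =>
      have hne : List.dropWhile PySem.Chars.isspace d ≠ [] := by rw [ht]; simp
      have hc : PySem.Chars.isspace c = false := by
        have h0 : ∀ (hne2 : c :: u ≠ []), PySem.Chars.isspace ((c :: u).head hne2) = false := by
          rw [← ht]
          intro hne2
          exact List.head_dropWhile_not _ hne2
        simpa using h0 (by simp)
      set w := c :: List.takeWhile (fun x => !PySem.Chars.isspace x) u with hwd
      set r := List.dropWhile (fun x => !PySem.Chars.isspace x) u with hrd
      have htw : c :: u = w ++ r := by
        rw [hwd, hrd, List.cons_append, List.takeWhile_append_dropWhile]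
      have hd2 : List.drop k cs = sp ++ w ++ r := by
        rw [← hdd, hd, ht, htw, List.append_assoc]
      have hwords : pvWords d = w :: pvWords r := by
        conv_lhs => rw [hd, ht]
        rw [pvWords_space_prefix sp _ hsp, pvWords_cons_nonspace u hc]
      have hgo : sepWhiteGo [] d = (sp ++ w) :: sepWhiteGo [] r.tail := by
        conv_lhs => rw [hd, ht]
        rw [sepWhiteGo_space_prefix sp [] _ hsp, List.nil_append, sepWhiteGo]
        simp only [hc, Bool.false_eq_true, if_false]
        rw [← hwd, ← hrd]
      have hlen : cs.length - k = sp.length + w.length + r.length := by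
        have h0 := congrArg List.length hd2
        simp only [List.length_drop, List.length_append] at h0
        omega
      have hwpos : 0 < w.length := by rw [hwd]; simp
      -- the first fold step
      have hstep : sepWhiteStep cs (ws, (k : Int)) w
          = (ws ++ [sp ++ w], ((k + sp.length + w.length + 1 : Nat) : Int)) := by
        rw [sepWhiteStep]
        simp only
        rw [findFrom_word cs k sp w r c _ hd2 hk hwd hc hsp]
        rw [if_pos (by omega)]
        rw [show (k : Int) + (sp.length : Int) + (w.length : Int)
              = ((k : Int) + (sp.length : Int)) + (w.length : Int) by ring] at *
        rw [slice_word cs k sp w r hd2 hk]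
        constructor <;> push_cast <;> ring_nf
      rw [hwords, List.foldl_cons, hstep, hgo]
      cases hr : r with
      | nil =>
        rw [hr] at *
        rw [pvWords_nil, List.foldl_nil]
        simp [sepWhiteGo]
      | cons rc rt =>
        have hrc : PySem.Chars.isspace rc = true := by
          have hne2 : List.dropWhile (fun x => !PySem.Chars.isspace x) u ≠ [] := by
            rw [← hrd, hr]; simp
          have h0 : ∀ (hne3 : rc :: rt ≠ []),
              (fun x => !PySem.Chars.isspace x) ((rc :: rt).head hne3) = false := by
            rw [show rc :: rt = List.dropWhile (fun x => !PySem.Chars.isspace x) u by rw [← hrd, hr]]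
            intro hne3
            exact List.head_dropWhile_not _ hne3
          simpa using h0 (by simp)
        have hdrop2 : List.drop (k + sp.length + w.length + 1) cs = rt := by
          rw [show k + sp.length + w.length + 1 = k + (sp.length + w.length + 1) by omega]
          rw [← List.drop_drop, hd2, hr]
          rw [show sp.length + w.length + 1 = (sp ++ w).length + 1 by simp]
          rw [← List.drop_drop, List.drop_left]
          simp
        have hlen2 : cs.length - k = sp.length + w.length + 1 + rt.length := by
          simp only [hr, List.length_cons] at hlen
          omega
        have hk2 : k + sp.length + w.length + 1 ≤ cs.length := by omega
        have hn2 : cs.length - (k + sp.length + w.length + 1) ≤ n := by omega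
        rw [pvWords_cons_space rt hrc,
          show rt = List.drop (k + sp.length + w.length + 1) cs from hdrop2.symm]
        rw [ih cs (k + sp.length + w.length + 1) (ws ++ [sp ++ w]) hn2 hk2]
        rw [hdrop2]
        simp

theorem separate_white_spec : Claim_equal_separate_white := by
  intro line _
  unfold Spec_separate_white separate_white separate_white_alt
  rw [split0_eq_pvWords, pvWords_strip]
  have h := fold_eq line.toList.length line.toList 0 [] (by omega) (by omega)
  simp only [List.drop_zero, Nat.cast_zero, List.nil_append] at h
  rw [h]
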